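-- pv_equiv track=rewrite | github.com/tianxin123456/homework | isalphabetical.py | isalphabetical_strings
-- ===== SOURCE A (Python) =====
-- def isalphabetical_strings(t):
--     if len(set(t)) != len(t):   # 排除有重复元素的情况
--         return 'No'
--     elif 'a' not in t:  # 排除不是从a开始的情况
--         return 'No'
--     else:  # 需要判断是否按序排开, 有三种情况
--         pos = t.index('a')   # 定位
--         while pos != t.index(max(t)):
--             if pos == 0:  # pos在最左端的情况
--                 if ord(t[pos + 1]) != ord(t[pos]) + 1:
--                     return 'No'
--                 else:
--                     t.pop(pos)
--             elif pos == len(t)-1:  # pos在最右端的情况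
--                 if ord(t[pos - 1]) != ord(t[pos]) + 1:
--                     return 'No'
--                 else:
--                     t.pop(pos)
--                     pos = pos-1
--             else: # pos在中间的情况
--                 if ord(t[pos-1]) == ord(t[pos]) + 1:  # pos左移
--                     t.pop(pos)
--                     pos = pos - 1
--                 elif ord(t[pos+1]) == ord(t[pos]) + 1:  # pos右移,但由于pop指针位置不用动
--                     t.pop(pos)
--                 else:
--                     return 'No'
--         return 'Yes'
-- ===== SOURCE B (Python) =====
-- def isalphabetical_strings(t):
--     if len(set(t)) != len(t):
--         return 'No'
--     if 'a' not in t: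
--         return 'No'
--     p = t.index('a')
--     m = max(t)
--     n = len(t)
--     i, j, cur = p - 1, p + 1, 'a'
--     while cur != m:
--         nxt = chr(ord(cur) + 1)
--         if i >= 0 and t[i] == nxt:
--             cur = nxt
--             i -= 1
--         elif j < n and t[j] == nxt:
--             cur = nxt
--             j += 1
--         else:
--             return 'No'
--     return 'Yes'
-- ===== Notes on version B (the rewrite author's own statement) =====
-- stated objective: alternative
-- what changed: A repeatedly re-scans and mutates the list (max(), index(), pop()) to peel characters off starting from 'a'; B leaves the list untouched and walks two pointers outward from the position of 'a', matching chr(ord(cur)+1) against the element just left or just right of the consumed block.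
-- outside the precondition, e.g. on isalphabetical_strings(['a', 'b', 'ab']): A returns 'Yes', B returns 'Yes'; on isalphabetical_strings(['a', 'ab']): A raises TypeError, B returns 'No'
import Mathlib
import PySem

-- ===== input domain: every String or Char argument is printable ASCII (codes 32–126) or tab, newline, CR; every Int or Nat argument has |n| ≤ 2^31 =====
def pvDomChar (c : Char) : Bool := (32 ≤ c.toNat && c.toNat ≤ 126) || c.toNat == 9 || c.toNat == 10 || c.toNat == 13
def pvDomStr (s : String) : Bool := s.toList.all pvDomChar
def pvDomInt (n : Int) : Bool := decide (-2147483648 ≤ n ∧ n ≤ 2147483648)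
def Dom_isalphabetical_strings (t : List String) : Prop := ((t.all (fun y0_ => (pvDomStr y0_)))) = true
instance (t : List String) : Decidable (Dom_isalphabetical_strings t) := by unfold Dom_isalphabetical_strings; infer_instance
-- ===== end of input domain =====

-- B replaces A's destructive peel-by-popping loop (max()/index()/pop() re-scans of a shrinking
-- list) by a non-mutating two-pointer walk outward from the position of 'a'. A mutates its
-- argument in place (pop); B does not — the equivalence proved here is about the return value only.

-- ord(s) for a single-character string; junk 0 on other strings (Python raises TypeError there; outside Pre_)
def pyOrd (s : String) : Int :=
  match s.toList with
  | [c] => (c.toNat : Int)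
  | _ => 0

-- ===== PORT A =====
-- the while loop of A: state = current list t and current position pos.
-- fuel only makes the recursion structural: it starts at len(t) and every iteration pops one
-- element, so it is never exhausted on inputs the proof covers
def loopA : Nat → List String → Int → String
  | 0, _, _ => "No"
  | fuel + 1, t, pos =>
    match PySem.List.max? t (fun x => x) with
    | none => "No"  -- Python raises here (max() of an empty list); unreachable under Pre_
    | some mx =>
      match PySem.List.index? t mx with
      | none => "No"  -- unreachable: mx ∈ t
      | some k =>
      if pos = (k : Int) then "Yes"
      else if pos = 0 then
        match PySem.List.pyGet? t (pos + 1), PySem.List.pyGet? t pos with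
        | some r, some c =>
          if pyOrd r ≠ pyOrd c + 1 then "No"
          else match PySem.List.pop? t pos with
            | some pr => loopA fuel pr.2 pos
            | none => "No"  -- unreachable: pos is in range
        | _, _ => "No"  -- Python IndexError; unreachable under Pre_
      else if pos = PySem.List.len t - 1 then
        match PySem.List.pyGet? t (pos - 1), PySem.List.pyGet? t pos with
        | some l, some c =>
          if pyOrd l ≠ pyOrd c + 1 then "No"
          else match PySem.List.pop? t pos with
            | some pr => loopA fuel pr.2 (pos - 1)
            | none => "No"
        | _, _ => "No"
      else
        match PySem.List.pyGet? t (pos - 1), PySem.List.pyGet? t (pos + 1), PySem.List.pyGet? t pos with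
        | some l, some r, some c =>
          if pyOrd l = pyOrd c + 1 then
            match PySem.List.pop? t pos with
            | some pr => loopA fuel pr.2 (pos - 1)
            | none => "No"
          else if pyOrd r = pyOrd c + 1 then
            match PySem.List.pop? t pos with
            | some pr => loopA fuel pr.2 pos
            | none => "No"
          else "No"
        | _, _, _ => "No"

def isalphabetical_strings (t : List String) : String :=
  if PySem.List.len (PySem.Set.ofList t) ≠ PySem.List.len t then "No"
  else if "a" ∉ t then "No"
  else
    match PySem.List.index? t "a" with
    | some p => loopA t.length t (p : Int)
    | none => "No"  -- unreachable: "a" ∈ t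

-- ===== PORT B =====
-- the while loop of B: two pointers i (left of the consumed block) and j (right of it)
def loopB (t : List String) (n : Int) (m : String) (cur : String) (i j : Int) : String :=
  if cur = m then "Yes"
  else
    if 0 ≤ i ∧ PySem.List.pyGet? t i = some (String.ofList [Char.ofNat (pyOrd cur + 1).toNat]) then
      loopB t n m (String.ofList [Char.ofNat (pyOrd cur + 1).toNat]) (i - 1) j
    else if j < n ∧ PySem.List.pyGet? t j = some (String.ofList [Char.ofNat (pyOrd cur + 1).toNat]) then
      loopB t n m (String.ofList [Char.ofNat (pyOrd cur + 1).toNat]) i (j + 1)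
    else "No"
termination_by ((i + 1).toNat, (n - j).toNat)
decreasing_by
  · exact Prod.Lex.left _ _ (by omega)
  · exact Prod.Lex.right _ (by omega)

def isalphabetical_strings_alt (t : List String) : String :=
  if PySem.List.len (PySem.Set.ofList t) ≠ PySem.List.len t then "No"
  else if "a" ∉ t then "No"
  else
    match PySem.List.index? t "a", PySem.List.max? t (fun x => x) with
    | some p, some mx => loopB t (PySem.List.len t) mx "a" ((p : Int) - 1) ((p : Int) + 1)
    | _, _ => "No"  -- unreachable: "a" ∈ t makes the list nonempty

-- ===== PRECONDITION & SPEC =====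
-- Pre_ excludes duplicate-free lists that contain 'a' together with some element that is not a
-- single character: on those A's ord() raises TypeError whenever the peeling walk reaches such an
-- element (and where the walk happens to finish first, A returns without ever validating them).
def Pre_isalphabetical_strings (t : List String) : Prop :=
  ¬ t.Nodup ∨ "a" ∉ t ∨ ∀ s ∈ t, s.toList.length = 1
instance (t : List String) : Decidable (Pre_isalphabetical_strings t) := by
  unfold Pre_isalphabetical_strings; infer_instance

def pvWitness_isalphabetical_strings : List String := ["b", "a", "c"]

def Spec_isalphabetical_strings (t : List String) (out : String) : Prop := out = isalphabetical_strings_alt t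
instance (t : List String) (out : String) : Decidable (Spec_isalphabetical_strings t out) := by unfold Spec_isalphabetical_strings; infer_instance

-- ===== CLAIM (what is proved, stated in full; the proofs are below) =====
def Claim_equal_isalphabetical_strings : Prop := ∀ (t : List String), Dom_isalphabetical_strings t → Pre_isalphabetical_strings t → Spec_isalphabetical_strings t (isalphabetical_strings t)

-- ===== LEMMAS AND PROOFS =====

-- len(set(t)) == len(t) detects exactly the duplicate-free lists
theorem pv_ofList_length_eq_iff (t : List String) :
    (PySem.Set.ofList t).length = t.length ↔ t.Nodup := by
  have hfin : (PySem.Set.ofList t).toFinset = t.toFinset := by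
    ext x; simp [List.mem_toFinset, PySem.Set.mem_ofList]
  have hcard : t.toFinset.card = (PySem.Set.ofList t).length := by
    rw [← hfin, List.toFinset_card_of_nodup (PySem.Set.nodup_ofList t)]
  constructor
  · intro h
    have hded : t.dedup.length = t.length := by
      rw [← List.card_toFinset, hcard, h]
    have := List.Sublist.eq_of_length (List.dedup_sublist t) hded
    rw [← this]; exact List.nodup_dedup t
  · intro h
    rw [← hcard, List.toFinset_card_of_nodup h]

-- max? of a nonempty list is some
theorem pv_foldl_step_isSome {α κ : Type} [LT κ] [DecidableLT κ] (key : α → κ) (l : List α) :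
    ∀ (o : Option α), o.isSome = true →
      (l.foldl (fun acc x => match acc with | none => some x | some m => if key m < key x then some x else some m) o).isSome = true := by
  induction l with
  | nil => intro o h; simpa
  | cons x l ih =>
    intro o h
    cases o with
    | none => simp at h
    | some m =>
      simp only [List.foldl_cons]
      apply ih
      by_cases hc : key m < key x <;> simp [hc]

theorem pv_max?_isSome {α κ : Type} [LT κ] [DecidableLT κ] (xs : List α) (key : α → κ)
    (h : xs ≠ []) : (PySem.List.max? xs key).isSome := by
  cases xs with
  | nil => exact absurd rfl h
  | cons x l =>
    unfold PySem.List.max?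
    simp only [List.foldl_cons]
    exact pv_foldl_step_isSome key l (some x) rfl

-- on a duplicate-free list, the unique upper-bound element is what max? returns
theorem pv_max?_eq_of_unique {α : Type} [LinearOrder α] (xs : List α) (m : α)
    (h1 : m ∈ xs) (h2 : ∀ y ∈ xs, y ≤ m) :
    PySem.List.max? xs (fun x => x) = some m := by
  obtain ⟨m', hm'⟩ := Option.isSome_iff_exists.mp (pv_max?_isSome xs (fun x => x) (List.ne_nil_of_mem h1))
  have hmem := PySem.List.max?_mem hm'
  have hle : ∀ y ∈ xs, y ≤ m' := fun y hy => PySem.List.max?_isMax (key := fun x => x) hm' y hy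
  have : m' = m := le_antisymm (h2 m' hmem) (hle m h1)
  rw [hm', this]

theorem pv_eraseIdx_append_cons {α : Type} (pre suf : List α) (x : α) :
    (pre ++ x :: suf).eraseIdx pre.length = pre ++ suf := by
  induction pre with
  | nil => simp
  | cons a l ih => simp [ih]

-- "ord(r) == ord(cur)+1"  ↔  "r == chr(ord(cur)+1)" for single-character strings in the domain
theorem pv_nxt_eq_iff (r cur : String) (hr1 : r.toList.length = 1) (hc1 : cur.toList.length = 1)
    (hb0 : 0 ≤ pyOrd cur) (hb : pyOrd cur ≤ 126) :
    pyOrd r = pyOrd cur + 1 ↔ r = String.ofList [Char.ofNat (pyOrd cur + 1).toNat] := by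
  obtain ⟨cr, hcr⟩ := List.length_eq_one_iff.mp hr1
  obtain ⟨cc, hcc⟩ := List.length_eq_one_iff.mp hc1
  have hor : pyOrd r = (cr.toNat : Int) := by simp [pyOrd, hcr]
  have hoc : pyOrd cur = (cc.toNat : Int) := by simp [pyOrd, hcc]
  have hval : ((pyOrd cur + 1).toNat).isValidChar := Or.inl (by omega)
  have htn : (Char.ofNat ((pyOrd cur + 1).toNat)).toNat = (pyOrd cur + 1).toNat := by
    rw [Char.toNat_ofNat, if_pos hval]
  constructor
  · intro h
    rw [← String.toList_inj, String.toList_ofList, hcr]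
    have hrt : cr.toNat = (pyOrd cur + 1).toNat := by omega
    have hcr2 := congrArg Char.ofNat hrt
    rw [Char.ofNat_toNat] at hcr2
    rw [hcr2]
  · intro h
    have : r.toList = [Char.ofNat ((pyOrd cur + 1).toNat)] := by
      rw [h, String.toList_ofList]
    rw [hor]
    rw [hcr] at this
    have hcr2 : cr = Char.ofNat ((pyOrd cur + 1).toNat) := by simpa using this
    rw [hcr2, htn]; omega

-- single characters in the domain have codes in [0, 126]
theorem pv_ord_bound (s : String) (hd : pvDomStr s = true) (hl : s.toList.length = 1) :
    0 ≤ pyOrd s ∧ pyOrd s ≤ 126 := by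
  obtain ⟨c, hc⟩ := List.length_eq_one_iff.mp hl
  have hcd : pvDomChar c = true := by
    rw [pvDomStr, hc] at hd; simpa using hd
  rw [pvDomChar] at hcd
  simp at hcd
  simp only [pyOrd, hc]
  omega

-- the heart: A's peeling loop equals B's two-pointer loop
theorem pv_loop_eq (L : List String) (n : Nat) (hn : n = L.length)
    (hdom : ∀ s ∈ L, pvDomStr s = true) (h1 : ∀ s ∈ L, s.toList.length = 1)
    (m : String) (hmax : ∀ y ∈ L, y ≤ m) :
    ∀ (fuel a b : Nat) (cur : String), a + 1 + (n - b) ≤ fuel → a < b → b ≤ n → cur ∈ L →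
      (L.take a ++ cur :: L.drop b).Nodup → m ∈ (L.take a ++ cur :: L.drop b) →
      loopA fuel (L.take a ++ cur :: L.drop b) (a : Int) = loopB L (n : Int) m cur ((a : Int) - 1) (b : Int) := by
  intro fuel
  induction fuel with
  | zero => intro a b cur hf; omega
  | succ f ih =>
    intro a b cur hf hab hb hcur hnd hmT
    have hbl : b ≤ L.length := hn ▸ hb
    have hal : a < L.length := by omega
    have hta : (L.take a).length = a := List.length_take_of_le (by omega)
    set T := L.take a ++ cur :: L.drop b with hT
    have hTlen : T.length = a + 1 + (L.length - b) := by
      simp only [hT, List.length_append, List.length_cons, List.length_take, List.length_drop]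
      omega
    have hmemT : ∀ y ∈ T, y ∈ L := by
      intro y hy
      rw [hT] at hy
      rcases List.mem_append.mp hy with h | h
      · exact List.mem_of_mem_take h
      · rcases List.mem_cons.mp h with h | h
        · exact h ▸ hcur
        · exact List.mem_of_mem_drop h
    have hmaxT : PySem.List.max? T (fun x => x) = some m :=
      pv_max?_eq_of_unique T m hmT (fun y hy => hmax y (hmemT y hy))
    obtain ⟨k, hk⟩ : ∃ k, PySem.List.index? T m = some k :=
      Option.isSome_iff_exists.mp ((PySem.List.index?_isSome_iff T m).mpr hmT)
    obtain ⟨hklt, hTk, -⟩ := PySem.List.getElem_of_index?_eq_some hk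
    have haT : a < T.length := by omega
    have hTa? : T[a]? = some cur := by
      have h0 := PySem.List.pyGet?_append_length (L.take a) (L.drop b) cur
      rw [hta] at h0
      rw [← hT] at h0
      simpa using h0
    have hTa : T[a]'haT = cur := by
      rw [List.getElem?_eq_getElem haT] at hTa?
      exact Option.some_inj.mp hTa?
    -- the iff between A's ord test and B's chr test, for elements of L
    have hbnd := pv_ord_bound cur (hdom cur hcur) (h1 cur hcur)
    have hiff : ∀ r ∈ L, (pyOrd r = pyOrd cur + 1 ↔
        r = String.ofList [Char.ofNat (pyOrd cur + 1).toNat]) :=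
      fun r hr => pv_nxt_eq_iff r cur (h1 r hr) (h1 cur hcur) hbnd.1 hbnd.2
    rw [loopB.eq_def]
    simp only [loopA, hmaxT, hk]
    by_cases hcm : cur = m
    · -- loop exit: the current element is the maximum, on both sides
      have hka : k = a := by
        have h : T[k]'hklt = T[a]'haT := by rw [hTk, hTa, hcm]
        exact (List.Nodup.getElem_inj_iff hnd).mp h
      rw [if_pos (show ((a : Nat) : Int) = ((k : Nat) : Int) by omega), if_pos hcm]
    · -- loop continues
      have hka : ¬ ((a : Nat) : Int) = (k : Int) := by
        intro h
        have hak : a = k := by exact_mod_cast h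
        apply hcm
        rw [← hTa, ← hTk]
        simp [hak]
      rw [if_neg hka, if_neg hcm]
      by_cases ha0 : a = 0
      · subst ha0
        by_cases hbn : b = n
        · -- T = [cur] would force m = cur: impossible in this branch
          exfalso
          have hTs : T = [cur] := by rw [hT, hbn, hn]; simp
          rw [hTs] at hmT
          exact hcm (List.mem_singleton.mp hmT).symm
        · -- pos = 0: only the right neighbour L[b] can continue the chain
          have hbL : b < L.length := by omega
          have hdropb : L.drop b = L[b] :: L.drop (b + 1) := List.drop_eq_getElem_cons hbL
          have hTc : T = cur :: L[b] :: L.drop (b + 1) := by rw [hT, hdropb]; simp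
          have hg1 : PySem.List.pyGet? T (((0 : Nat) : Int) + 1) = some (L[b]'hbL) := by
            rw [show ((0 : Nat) : Int) + 1 = ((1 : Nat) : Int) by omega, PySem.List.pyGet?_natCast,
                hTc]
            simp
          have hg0 : PySem.List.pyGet? T ((0 : Nat) : Int) = some cur := by
            rw [PySem.List.pyGet?_natCast]
            exact hTa?
          rw [if_pos (by norm_num : ((0 : Nat) : Int) = 0), hg1, hg0]
          simp only []
          have hBineg : ¬ (0 ≤ ((0 : Nat) : Int) - 1 ∧ PySem.List.pyGet? L (((0 : Nat) : Int) - 1) =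
              some (String.ofList [Char.ofNat (pyOrd cur + 1).toNat])) := by
            rintro ⟨hcon, -⟩
            omega
          by_cases hmatch : pyOrd (L[b]'hbL) = pyOrd cur + 1
          · have hAno : ¬ (pyOrd (L[b]'hbL) ≠ pyOrd cur + 1) := not_not_intro hmatch
            rw [if_neg hAno]
            have hpop : PySem.List.pop? T ((0 : Nat) : Int) = some (cur, L[b] :: L.drop (b + 1)) := by
              rw [hTc]
              simp [PySem.List.pop?_zero_cons]
            rw [hpop]
            simp only []
            have hNeq : L[b]'hbL = String.ofList [Char.ofNat (pyOrd cur + 1).toNat] :=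
              (hiff _ (List.getElem_mem hbL)).mp hmatch
            have hBjpos : ((b : Nat) : Int) < ((n : Nat) : Int) ∧ PySem.List.pyGet? L ((b : Nat) : Int) =
                some (String.ofList [Char.ofNat (pyOrd cur + 1).toNat]) := by
              refine ⟨by exact_mod_cast (by omega : b < n), ?_⟩
              rw [PySem.List.pyGet?_natCast, List.getElem?_eq_getElem hbL, hNeq]
            rw [if_neg hBineg, if_pos hBjpos]
            have hrec := ih 0 (b + 1) (L[b]'hbL) (by omega) (by omega) (by omega)
              (List.getElem_mem hbL)
              (by
                rw [List.take_zero, List.nil_append, ← hdropb]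
                have hsub : List.Sublist (L.drop b) T := by
                  rw [hTc, hdropb]
                  exact List.sublist_cons_self _ _
                exact hsub.nodup hnd)
              (by
                rw [List.take_zero, List.nil_append, ← hdropb]
                rcases List.mem_cons.mp (hTc ▸ hmT) with h | h
                · exact absurd h.symm hcm
                · rw [hdropb]; exact h)
            rw [List.take_zero, List.nil_append] at hrec
            rw [← hNeq, show ((b : Nat) : Int) + 1 = (((b + 1 : Nat)) : Int) from by push_cast; ring]
            exact hrec
          · have hAyes : pyOrd (L[b]'hbL) ≠ pyOrd cur + 1 := hmatch
            rw [if_pos hAyes]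
            have hBjneg : ¬ (((b : Nat) : Int) < ((n : Nat) : Int) ∧ PySem.List.pyGet? L ((b : Nat) : Int) =
                some (String.ofList [Char.ofNat (pyOrd cur + 1).toNat])) := by
              rintro ⟨-, hcon⟩
              rw [PySem.List.pyGet?_natCast, List.getElem?_eq_getElem hbL] at hcon
              exact hmatch ((hiff _ (List.getElem_mem hbL)).mpr (Option.some_inj.mp hcon))
            rw [if_neg hBineg, if_neg hBjneg]
      · -- a ≥ 1
        have haL : a - 1 < L.length := by omega
        have hTL : L.take a ++ L.drop b = L.take (a - 1) ++ (L[a - 1]'haL) :: L.drop b := by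
          have h2 : L.take (a - 1 + 1) = L.take (a - 1) ++ (L[a - 1]?).toList :=
            List.take_add_one
          rw [List.getElem?_eq_getElem haL] at h2
          rw [show a - 1 + 1 = a from by omega] at h2
          rw [h2, List.append_assoc]
          rfl
        have hgm1 : PySem.List.pyGet? T (((a : Nat) : Int) - 1) = some (L[a - 1]'haL) := by
          rw [show ((a : Nat) : Int) - 1 = ((a - 1 : Nat) : Int) by omega, PySem.List.pyGet?_natCast,
              hT, List.getElem?_append_left (by omega), List.getElem?_take_of_lt (by omega),
              List.getElem?_eq_getElem haL]
        have hga : PySem.List.pyGet? T ((a : Nat) : Int) = some cur := by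
          rw [PySem.List.pyGet?_natCast]
          exact hTa?
        have hBi : PySem.List.pyGet? L (((a : Nat) : Int) - 1) = some (L[a - 1]'haL) := by
          rw [show ((a : Nat) : Int) - 1 = ((a - 1 : Nat) : Int) by omega, PySem.List.pyGet?_natCast,
              List.getElem?_eq_getElem haL]
        have hpop : PySem.List.pop? T ((a : Nat) : Int) = some (cur, L.take a ++ L.drop b) := by
          rw [PySem.List.pop?_natCast T a haT, hTa]
          have herase : T.eraseIdx a = L.take a ++ L.drop b := by
            have h := pv_eraseIdx_append_cons (L.take a) (L.drop b) cur
            rw [hta] at h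
            rw [← hT] at h
            exact h
          rw [herase]
        have hsubL : List.Sublist (L.take a ++ L.drop b) T := by
          rw [hT]
          exact List.Sublist.append_left (List.sublist_cons_self _ _) _
        have hndL : (L.take a ++ L.drop b).Nodup := hsubL.nodup hnd
        have hmTL : m ∈ L.take a ++ L.drop b := by
          rcases List.mem_append.mp (hT ▸ hmT) with h | h
          · exact List.mem_append.mpr (Or.inl h)
          · rcases List.mem_cons.mp h with h | h
            · exact absurd h.symm hcm
            · exact List.mem_append.mpr (Or.inr h)
        rw [if_neg (show ¬ ((a : Nat) : Int) = 0 by omega)]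
        by_cases hbn : b = n
        · -- pos = len(t)-1: only the left neighbour L[a-1] can continue the chain
          have hlen1 : ((a : Nat) : Int) = PySem.List.len T - 1 := by
            rw [PySem.List.len_eq, hTlen]
            omega
          rw [if_pos hlen1, hgm1, hga]
          simp only []
          by_cases hmatch : pyOrd (L[a - 1]'haL) = pyOrd cur + 1
          · have hAno : ¬ (pyOrd (L[a - 1]'haL) ≠ pyOrd cur + 1) := not_not_intro hmatch
            rw [if_neg hAno, hpop]
            simp only []
            have hNeq : L[a - 1]'haL = String.ofList [Char.ofNat (pyOrd cur + 1).toNat] :=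
              (hiff _ (List.getElem_mem haL)).mp hmatch
            have hBipos : 0 ≤ ((a : Nat) : Int) - 1 ∧ PySem.List.pyGet? L (((a : Nat) : Int) - 1) =
                some (String.ofList [Char.ofNat (pyOrd cur + 1).toNat]) := by
              refine ⟨by omega, ?_⟩
              rw [hBi, hNeq]
            rw [if_pos hBipos]
            have hrec := ih (a - 1) b (L[a - 1]'haL) (by omega) (by omega) hb
              (List.getElem_mem haL)
              (by rw [← hTL]; exact hndL)
              (by rw [← hTL]; exact hmTL)
            rw [hTL, ← hNeq, show ((a : Nat) : Int) - 1 = (((a - 1 : Nat)) : Int) from by omega]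
            exact hrec
          · have hAyes : pyOrd (L[a - 1]'haL) ≠ pyOrd cur + 1 := hmatch
            rw [if_pos hAyes]
            have hBineg : ¬ (0 ≤ ((a : Nat) : Int) - 1 ∧ PySem.List.pyGet? L (((a : Nat) : Int) - 1) =
                some (String.ofList [Char.ofNat (pyOrd cur + 1).toNat])) := by
              rintro ⟨-, hcon⟩
              rw [hBi] at hcon
              exact hmatch ((hiff _ (List.getElem_mem haL)).mpr (Option.some_inj.mp hcon))
            have hBjneg : ¬ (((b : Nat) : Int) < ((n : Nat) : Int) ∧ PySem.List.pyGet? L ((b : Nat) : Int) =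
                some (String.ofList [Char.ofNat (pyOrd cur + 1).toNat])) := by
              rintro ⟨hcon, -⟩
              omega
            rw [if_neg hBineg, if_neg hBjneg]
        · -- middle position: the left neighbour is tried first, then the right one
          have hbL : b < L.length := by omega
          have hdropb : L.drop b = L[b] :: L.drop (b + 1) := List.drop_eq_getElem_cons hbL
          have hlen1 : ¬ ((a : Nat) : Int) = PySem.List.len T - 1 := by
            rw [PySem.List.len_eq, hTlen]
            omega
          rw [if_neg hlen1]
          have hgr : PySem.List.pyGet? T (((a : Nat) : Int) + 1) = some (L[b]'hbL) := by
            rw [show ((a : Nat) : Int) + 1 = ((a + 1 : Nat) : Int) by omega,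
                PySem.List.pyGet?_natCast, hT, List.getElem?_append_right (by omega)]
            rw [hta, show a + 1 - a = 1 by omega]
            rw [List.getElem?_cons_succ, List.getElem?_drop, show b + 0 = b by omega,
                List.getElem?_eq_getElem hbL]
          rw [hgm1, hgr, hga]
          simp only []
          have hTR : L.take a ++ L.drop b = L.take a ++ L[b] :: L.drop (b + 1) := by
            rw [hdropb]
          by_cases hmatchL : pyOrd (L[a - 1]'haL) = pyOrd cur + 1
          · rw [if_pos hmatchL, hpop]
            simp only []
            have hNeq : L[a - 1]'haL = String.ofList [Char.ofNat (pyOrd cur + 1).toNat] :=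
              (hiff _ (List.getElem_mem haL)).mp hmatchL
            have hBipos : 0 ≤ ((a : Nat) : Int) - 1 ∧ PySem.List.pyGet? L (((a : Nat) : Int) - 1) =
                some (String.ofList [Char.ofNat (pyOrd cur + 1).toNat]) := by
              refine ⟨by omega, ?_⟩
              rw [hBi, hNeq]
            rw [if_pos hBipos]
            have hrec := ih (a - 1) b (L[a - 1]'haL) (by omega) (by omega) hb
              (List.getElem_mem haL)
              (by rw [← hTL]; exact hndL)
              (by rw [← hTL]; exact hmTL)
            rw [hTL, ← hNeq, show ((a : Nat) : Int) - 1 = (((a - 1 : Nat)) : Int) from by omega]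
            exact hrec
          · rw [if_neg hmatchL]
            have hBineg : ¬ (0 ≤ ((a : Nat) : Int) - 1 ∧ PySem.List.pyGet? L (((a : Nat) : Int) - 1) =
                some (String.ofList [Char.ofNat (pyOrd cur + 1).toNat])) := by
              rintro ⟨-, hcon⟩
              rw [hBi] at hcon
              exact hmatchL ((hiff _ (List.getElem_mem haL)).mpr (Option.some_inj.mp hcon))
            by_cases hmatchR : pyOrd (L[b]'hbL) = pyOrd cur + 1
            · rw [if_pos hmatchR, hpop]
              simp only []
              have hNeq : L[b]'hbL = String.ofList [Char.ofNat (pyOrd cur + 1).toNat] :=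
                (hiff _ (List.getElem_mem hbL)).mp hmatchR
              have hBjpos : ((b : Nat) : Int) < ((n : Nat) : Int) ∧ PySem.List.pyGet? L ((b : Nat) : Int) =
                  some (String.ofList [Char.ofNat (pyOrd cur + 1).toNat]) := by
                refine ⟨by exact_mod_cast (by omega : b < n), ?_⟩
                rw [PySem.List.pyGet?_natCast, List.getElem?_eq_getElem hbL, hNeq]
              rw [if_neg hBineg, if_pos hBjpos]
              have hrec := ih a (b + 1) (L[b]'hbL) (by omega) (by omega) (by omega)
                (List.getElem_mem hbL)
                (by rw [← hTR]; exact hndL)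
                (by rw [← hTR]; exact hmTL)
              rw [hTR, ← hNeq, show ((b : Nat) : Int) + 1 = (((b + 1 : Nat)) : Int) from by push_cast; ring]
              exact hrec
            · rw [if_neg hmatchR]
              have hBjneg : ¬ (((b : Nat) : Int) < ((n : Nat) : Int) ∧ PySem.List.pyGet? L ((b : Nat) : Int) =
                  some (String.ofList [Char.ofNat (pyOrd cur + 1).toNat])) := by
                rintro ⟨-, hcon⟩
                rw [PySem.List.pyGet?_natCast, List.getElem?_eq_getElem hbL] at hcon
                exact hmatchR ((hiff _ (List.getElem_mem hbL)).mpr (Option.some_inj.mp hcon))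
              rw [if_neg hBineg, if_neg hBjneg]


-- ===== VERDICT (by name: the statement is the Claim_ definition above) =====
theorem isalphabetical_strings_spec : Claim_equal_isalphabetical_strings := by
  unfold Claim_equal_isalphabetical_strings
  intro t hdom hpre
  unfold Spec_isalphabetical_strings isalphabetical_strings isalphabetical_strings_alt
  by_cases hdup : PySem.List.len (PySem.Set.ofList t) ≠ PySem.List.len t
  · rw [if_pos hdup, if_pos hdup]
  · rw [if_neg hdup, if_neg hdup]
    have hlen : (PySem.Set.ofList t).length = t.length := by
      have h := not_not.mp hdup
      simp only [PySem.List.len_eq] at h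
      exact_mod_cast h
    have hnd : t.Nodup := (pv_ofList_length_eq_iff t).mp hlen
    by_cases hmem : "a" ∉ t
    · rw [if_pos hmem, if_pos hmem]
    · rw [if_neg hmem, if_neg hmem]
      have hmem' : "a" ∈ t := not_not.mp hmem
      have hsingle : ∀ s ∈ t, s.toList.length = 1 := by
        rcases hpre with h | h | h
        · exact absurd hnd h
        · exact absurd hmem' h
        · exact h
      have hdom' : ∀ s ∈ t, pvDomStr s = true := by
        intro s hs
        unfold Dom_isalphabetical_strings at hdom
        rw [List.all_eq_true] at hdom
        simpa using hdom s hs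
      obtain ⟨p, hp⟩ : ∃ p, PySem.List.index? t "a" = some p :=
        Option.isSome_iff_exists.mp ((PySem.List.index?_isSome_iff t "a").mpr hmem')
      obtain ⟨mx, hmx⟩ : ∃ mx, PySem.List.max? t (fun x => x) = some mx :=
        Option.isSome_iff_exists.mp (pv_max?_isSome t (fun x => x) (List.ne_nil_of_mem hmem'))
      rw [hp, hmx]
      simp only []
      obtain ⟨hplt, htp, -⟩ := PySem.List.getElem_of_index?_eq_some hp
      have hdec2 : t = t.take p ++ "a" :: t.drop (p + 1) := by
        have h := (List.take_append_drop p t).symm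
        rw [List.drop_eq_getElem_cons hplt, htp] at h
        exact h
      have hmain := pv_loop_eq t t.length rfl hdom' hsingle mx
        (fun y hy => PySem.List.max?_isMax (key := fun x => x) hmx y hy)
        t.length p (p + 1) "a" (by omega) (by omega) (by omega) hmem'
        (by rw [← hdec2]; exact hnd)
        (by rw [← hdec2]; exact PySem.List.max?_mem hmx)
      rw [← hdec2] at hmain
      simp only [PySem.List.len_eq]
      push_cast at hmain ⊢
      exact hmain
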